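-- pv_equiv track=rewrite | github.com/Abrechen2/sublarr | backend/op_ed_detector.py | _split_into_clusters
-- ===== SOURCE A (Python) =====
-- _MAX_GAP_MS = 3_000  # max gap between events in a cluster
--
-- def _split_into_clusters(events: list[dict]) -> list[list[dict]]:
--     """Split sorted events into contiguous clusters (no gap > _MAX_GAP_MS)."""
--     if not events:
--         return []
--     clusters: list[list[dict]] = []
--     current = [events[0]]
--     for event in events[1:]:
--         if event["start"] - current[-1]["end"] > _MAX_GAP_MS:
--             clusters.append(current)
--             current = [event]
--         else:
--             current.append(event)
--     clusters.append(current)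
--     return clusters
-- ===== SOURCE B (Python) =====
-- _MAX_GAP_MS = 3_000  # max gap between events in a cluster
--
-- def _split_into_clusters(events):
--     """Two-pass variant: collect boundary indices, then slice between cut points."""
--     if not events:
--         return []
--     cuts = [0]
--     for i in range(1, len(events)):
--         if events[i]["start"] - events[i - 1]["end"] > _MAX_GAP_MS:
--             cuts.append(i)
--     cuts.append(len(events))
--     return [events[a:b] for a, b in zip(cuts, cuts[1:])]
-- ===== Notes on version B (the rewrite author's own statement) =====
-- stated objective: alternative
-- what changed: Replaces the single accumulate-and-flush loop with two passes: one pass collecting boundary indices where the gap exceeds _MAX_GAP_MS, then building clusters by slicing the list between consecutive cut points.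
import Mathlib
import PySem

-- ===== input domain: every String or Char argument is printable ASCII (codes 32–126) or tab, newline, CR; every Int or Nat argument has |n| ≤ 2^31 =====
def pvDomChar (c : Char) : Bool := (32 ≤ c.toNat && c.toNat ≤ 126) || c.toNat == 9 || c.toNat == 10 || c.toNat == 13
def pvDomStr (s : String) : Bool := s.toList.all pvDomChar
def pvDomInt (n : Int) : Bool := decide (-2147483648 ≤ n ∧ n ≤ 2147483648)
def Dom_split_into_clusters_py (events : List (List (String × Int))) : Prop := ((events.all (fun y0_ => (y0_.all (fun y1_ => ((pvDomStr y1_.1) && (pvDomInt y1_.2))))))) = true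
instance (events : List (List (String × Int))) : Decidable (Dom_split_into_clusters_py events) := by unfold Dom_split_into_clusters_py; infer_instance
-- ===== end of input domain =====

-- B replaces A's single accumulate-and-flush loop with two passes — boundary-index
-- collection, then slicing between consecutive cut points (objective: alternative
-- decomposition, same cost).

-- e["k"] for an event dict (Python raises KeyError on a missing key; Pre_ guarantees presence)
def pvLookup (e : List (String × Int)) (k : String) : Int :=
  PySem.Dict.getD (PySem.Dict.mk e) k 0

-- ===== PORT A =====
def split_into_clusters_py (events : List (List (String × Int))) : List (List (List (String × Int))) :=
  match events with
  | [] => []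
  | e0 :: rest =>
    -- clusters, current = [], [events[0]]; for event in events[1:]: …
    let st := rest.foldl
      (fun (s : List (List (List (String × Int))) × List (List (String × Int))) event =>
        if pvLookup event "start" - pvLookup (PySem.List.pyGetD s.2 (-1) []) "end" > 3000 then
          (s.1 ++ [s.2], [event])
        else
          (s.1, s.2 ++ [event]))
      ([], [e0])
    st.1 ++ [st.2]

-- ===== PORT B =====
def split_into_clusters_py_alt (events : List (List (String × Int))) : List (List (List (String × Int))) :=
  if events.isEmpty then []
  else
    let n : Int := events.length
    -- cuts = [0]; for i in range(1, len(events)): if gap: cuts.append(i)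
    let cuts := (PySem.List.pyRange 1 n 1).foldl
      (fun cs i =>
        if pvLookup (PySem.List.pyGetD events i []) "start"
             - pvLookup (PySem.List.pyGetD events (i - 1) []) "end" > 3000 then
          cs ++ [i]
        else cs)
      [0]
    let cuts2 := cuts ++ [n]
    (cuts2.zip cuts2.tail).map (fun ab => PySem.List.slice events (some ab.1) (some ab.2))

-- ===== PRECONDITION & SPEC =====
-- Pre_ excludes exactly the inputs where Python A raises KeyError (a non-first event
-- without "start", or a non-last event without "end"), plus events with duplicate keys,
-- on which an association list does not represent a unique Python dict (first-match vs
-- last-wins is an unspecified corner of the encoding).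
def Pre_split_into_clusters_py (events : List (List (String × Int))) : Prop :=
  (∀ e ∈ events.tail, (PySem.Dict.mk e).contains "start" = true) ∧
  (∀ e ∈ events.dropLast, (PySem.Dict.mk e).contains "end" = true) ∧
  (∀ e ∈ events, (e.map Prod.fst).Nodup)
instance (events : List (List (String × Int))) : Decidable (Pre_split_into_clusters_py events) := by
  unfold Pre_split_into_clusters_py; infer_instance

def pvWitness_split_into_clusters_py : (List (List (String × Int))) :=
  [[("start", 0), ("end", 100)], [("start", 9000), ("end", 9100)]]

def Spec_split_into_clusters_py (events : List (List (String × Int))) (out : List (List (List (String × Int)))) : Prop := out = split_into_clusters_py_alt events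
instance (events : List (List (String × Int))) (out : List (List (List (String × Int)))) : Decidable (Spec_split_into_clusters_py events out) := by unfold Spec_split_into_clusters_py; infer_instance

-- ===== CLAIM (what is proved, stated in full; the proofs are below) =====
def Claim_equal_split_into_clusters_py : Prop := ∀ (events : List (List (String × Int))), Dom_split_into_clusters_py events → Pre_split_into_clusters_py events → Spec_split_into_clusters_py events (split_into_clusters_py events)

-- ===== LEMMAS AND PROOFS =====

-- gap test between consecutive events at index i (1 ≤ i < n), as B reads it
def pvGapAt (events : List (List (String × Int))) (i : Nat) : Bool :=
  pvLookup (events.getD i []) "start" - pvLookup (events.getD (i - 1) []) "end" > 3000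

-- A's loop body and A's loop as a structural recursion on the remaining events
def pvStep (s : List (List (List (String × Int))) × List (List (String × Int)))
    (event : List (String × Int)) :
    List (List (List (String × Int))) × List (List (String × Int)) :=
  if pvLookup event "start" - pvLookup (PySem.List.pyGetD s.2 (-1) []) "end" > 3000 then
    (s.1 ++ [s.2], [event])
  else
    (s.1, s.2 ++ [event])

def pvChunks (cur : List (List (String × Int))) :
    List (List (String × Int)) → List (List (List (String × Int)))
  | [] => [cur]
  | e :: rest =>
    if pvLookup e "start" - pvLookup (PySem.List.pyGetD cur (-1) []) "end" > 3000 then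
      cur :: pvChunks [e] rest
    else
      pvChunks (cur ++ [e]) rest

-- slice events[j:k] with Nat bounds
def pvSl (events : List (List (String × Int))) (j k : Nat) : List (List (String × Int)) :=
  (events.drop j).take (k - j)

-- boundary indices in [k, n)
def pvBnds (events : List (List (String × Int))) (k : Nat) : List Nat :=
  (List.range' k (events.length - k)).filter (pvGapAt events)

-- clusters from cut points j :: cs (terminal cut = length)
def pvSlices (events : List (List (String × Int))) (j : Nat) :
    List Nat → List (List (List (String × Int)))
  | [] => [pvSl events j events.length]
  | c :: cs => pvSl events j c :: pvSlices events c cs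

theorem pv_foldA (l : List (List (String × Int)))
    (acc : List (List (List (String × Int)))) (cur : List (List (String × Int))) :
    (l.foldl pvStep (acc, cur)).1 ++ [(l.foldl pvStep (acc, cur)).2] = acc ++ pvChunks cur l := by
  induction l generalizing acc cur with
  | nil => simp [pvChunks]
  | cons e rest ih =>
    simp only [List.foldl_cons, pvChunks, pvStep]
    split_ifs with h
    · rw [ih]; simp
    · rw [ih]

theorem pv_sl_snoc (events : List (List (String × Int))) (j k : Nat)
    (hj : j ≤ k) (hk : k < events.length) :
    pvSl events j (k + 1) = pvSl events j k ++ [events.getD k []] := by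
  simp only [pvSl]
  have h1 : k + 1 - j = (k - j) + 1 := by omega
  rw [h1, List.take_add_one]
  have h2 : (events.drop j)[k - j]? = some (events.getD k []) := by
    rw [List.getElem?_drop]
    have h3 : j + (k - j) = k := by omega
    rw [h3, List.getElem?_eq_getElem hk, List.getD_eq_getElem _ _ hk]
  rw [h2]
  rfl

theorem pv_sl_last (events : List (List (String × Int))) (j k : Nat)
    (hjk : j < k) (hk : k ≤ events.length) :
    PySem.List.pyGetD (pvSl events j k) (-1) [] = events.getD (k - 1) [] := by
  obtain ⟨m, rfl⟩ : ∃ m, k = m + 1 := ⟨k - 1, by omega⟩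
  rw [pv_sl_snoc events j m (by omega) (by omega),
    PySem.List.pyGetD_neg_one_append_singleton]
  simp

theorem pv_drop (events : List (List (String × Int))) (k : Nat) (hk : k < events.length) :
    events.drop k = events.getD k [] :: events.drop (k + 1) := by
  rw [List.drop_eq_getElem_cons hk, List.getD_eq_getElem _ _ hk]

theorem pv_bnds_step (events : List (List (String × Int))) (k : Nat) (hk : k < events.length) :
    pvBnds events k =
      if pvGapAt events k then k :: pvBnds events (k + 1) else pvBnds events (k + 1) := by
  simp only [pvBnds]
  have h1 : events.length - k = (events.length - (k + 1)) + 1 := by omega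
  rw [h1, List.range'_succ, List.filter_cons]

theorem pv_main (events : List (List (String × Int))) (m j k : Nat)
    (hm : m = events.length - k) (hjk : j < k) (hk : k ≤ events.length) :
    pvChunks (pvSl events j k) (events.drop k) = pvSlices events j (pvBnds events k) := by
  induction m generalizing j k with
  | zero =>
    have hkn : k = events.length := by omega
    subst hkn
    simp [pvChunks, pvBnds, pvSlices, List.drop_length]
  | succ m ih =>
    have hkn : k < events.length := by omega
    have hb := pv_bnds_step events k hkn
    rw [pv_drop events k hkn]
    simp only [pvChunks]
    rw [pv_sl_last events j k hjk hk]
    by_cases h : pvLookup (events.getD k []) "start" - pvLookup (events.getD (k - 1) []) "end" > 3000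
    · rw [if_pos h]
      have hone : [events.getD k []] = pvSl events k (k + 1) := by
        rw [pv_sl_snoc events k k (le_refl k) hkn]
        simp [pvSl]
      have hg : pvGapAt events k = true := by
        simp only [pvGapAt, decide_eq_true_eq]; exact h
      rw [hone, ih k (k + 1) (by omega) (by omega) (by omega), hb, if_pos hg]
      rfl
    · rw [if_neg h]
      have hg : pvGapAt events k = false := by
        simp only [pvGapAt, decide_eq_false_iff_not]; exact h
      have hsnoc := pv_sl_snoc events j k (by omega) hkn
      rw [← hsnoc, ih j (k + 1) (by omega) (by omega) (by omega), hb, if_neg (by simp [hg])]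

-- B's first pass: the cuts foldl collects exactly the boundary indices pvBnds
theorem pv_cuts (events : List (List (String × Int))) (m a : Nat)
    (hm : m = events.length - a) (ha : 1 ≤ a) (cs : List Int) :
    (PySem.List.pyRange (a : Int) (events.length : Int) 1).foldl
      (fun cs i =>
        if pvLookup (PySem.List.pyGetD events i []) "start"
             - pvLookup (PySem.List.pyGetD events (i - 1) []) "end" > 3000 then
          cs ++ [i]
        else cs)
      cs = cs ++ (pvBnds events a).map (fun (a : Nat) => (a : Int)) := by
  induction m generalizing a cs with
  | zero =>
    have hna : events.length ≤ a := by omega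
    rw [PySem.List.pyRange_one_eq_nil (by exact_mod_cast hna)]
    have : events.length - a = 0 := by omega
    simp [pvBnds, this]
  | succ m ih =>
    have han : a < events.length := by omega
    rw [PySem.List.pyRange_one_cons (by exact_mod_cast han), List.foldl_cons]
    have hi1 : ((a : Int)) - 1 = ((a - 1 : Nat) : Int) := by omega
    have hcond : (pvLookup (PySem.List.pyGetD events (a : Int) []) "start"
        - pvLookup (PySem.List.pyGetD events ((a : Int) - 1) []) "end" > 3000)
        ↔ pvGapAt events a = true := by
      rw [hi1]
      simp only [PySem.List.pyGetD_natCast, pvGapAt, decide_eq_true_eq]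
    have hstep : ((a : Int)) + 1 = ((a + 1 : Nat) : Int) := by omega
    rw [hstep, pv_bnds_step events a han]
    by_cases h : pvGapAt events a = true
    · rw [if_pos (hcond.mpr h), ih (a + 1) (by omega) (by omega),
        if_pos h]
      simp
    · rw [if_neg (fun hc => h (hcond.mp hc)), ih (a + 1) (by omega) (by omega),
        if_neg h]

theorem pv_zip (events : List (List (String × Int))) (cs : List Nat) (j : Nat) :
    ((((j :: cs ++ [events.length]).map (fun (a : Nat) => (a : Int))).zip
        ((cs ++ [events.length]).map (fun (a : Nat) => (a : Int)))).map
      (fun ab => PySem.List.slice events (some ab.1) (some ab.2)))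
      = pvSlices events j cs := by
  induction cs generalizing j with
  | nil =>
    simp [pvSlices, PySem.List.slice_natCast, pvSl]
  | cons c cs ih =>
    simp only [List.cons_append, List.map_cons, List.zip_cons_cons]
    have hih := ih c
    simp only [List.cons_append, List.map_cons] at hih
    rw [hih]
    simp [pvSlices, PySem.List.slice_natCast, pvSl]

-- ===== VERDICT (by name: the statement is the Claim_ definition above) =====
theorem split_into_clusters_py_spec : Claim_equal_split_into_clusters_py := by
  intro events _ _
  unfold Spec_split_into_clusters_py
  cases events with
  | nil => rfl
  | cons e0 rest =>
    -- A side: the fold is pvChunks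
    have hA : split_into_clusters_py (e0 :: rest) = pvChunks [e0] rest := by
      show (rest.foldl pvStep ([], [e0])).1 ++ [(rest.foldl pvStep ([], [e0])).2] = _
      rw [pv_foldA]
      rfl
    -- A = slices at boundaries
    have hmain := pv_main (e0 :: rest) ((e0 :: rest).length - 1) 0 1 rfl (by omega)
      (by simp)
    have hsl : pvSl (e0 :: rest) 0 1 = [e0] := rfl
    have hdrop : (e0 :: rest).drop 1 = rest := rfl
    rw [hsl, hdrop] at hmain
    -- B side
    have hB : split_into_clusters_py_alt (e0 :: rest)
        = pvSlices (e0 :: rest) 0 (pvBnds (e0 :: rest) 1) := by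
      simp only [split_into_clusters_py_alt, List.isEmpty_cons, Bool.false_eq_true,
        if_false]
      have hc := pv_cuts (e0 :: rest) ((e0 :: rest).length - 1) 1 (by omega) (le_refl 1) [0]
      simp only [Nat.cast_one] at hc
      rw [hc]
      have hcuts : ([(0 : Int)] ++ (pvBnds (e0 :: rest) 1).map (fun (a : Nat) => (a : Int)))
          ++ [((e0 :: rest).length : Int)]
          = ((0 :: pvBnds (e0 :: rest) 1 ++ [(e0 :: rest).length]).map
              (fun a : Nat => (a : Int))) := by
        simp
      rw [hcuts]
      have htail : ((0 :: pvBnds (e0 :: rest) 1 ++ [(e0 :: rest).length]).map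
            (fun a : Nat => (a : Int))).tail
          = ((pvBnds (e0 :: rest) 1 ++ [(e0 :: rest).length]).map
              (fun a : Nat => (a : Int))) := rfl
      rw [htail]
      exact pv_zip (e0 :: rest) (pvBnds (e0 :: rest) 1) 0
    rw [hA, hB, hmain]
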